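-- pv_equiv track=rewrite | github.com/pokochy/JB-Pirate-King | aivdm_gen/test.py | build_vsd
-- ===== SOURCE A (Python) =====
-- def nmea_checksum(sentence: str) -> str:
--     checksum = 0
--     for ch in sentence:
--         checksum ^= ord(ch)
--     return f"{checksum:02X}"
--
-- def encode_payload(bits: list[int]) -> str:
--     while len(bits) % 6:
--         bits.append(0)
--     payload = []
--     for i in range(0, len(bits), 6):
--         value = 0
--         for bit in bits[i:i + 6]:
--             value = (value << 1) | bit
--         char_code = value + 48
--         if char_code > 87:
--             char_code += 8
--         payload.append(chr(char_code))
--     return "".join(payload)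
--
-- def build_vsd(mmsi: int, vessel_name: str) -> str:
--     name = vessel_name[:20].upper().ljust(20, "@")
--     bits: list[int] = []
--
--     def push(value: int, width: int) -> None:
--         for i in range(width - 1, -1, -1):
--             bits.append((value >> i) & 1)
--
--     def push_str(value: str, width: int) -> None:
--         for ch in value[:width]:
--             code = ord(ch)
--             if code >= 64:
--                 code -= 64
--             push(code, 6)
--
--     push(24, 6)
--     push(0, 2)
--     push(mmsi, 30)
--     push(0, 2)
--     push_str(name, 20)
--     push(0, 8)
--
--     payload = encode_payload(bits)
--     sentence_body = f"AIVDM,1,1,,A,{payload},0"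
--     return f"!{sentence_body}*{nmea_checksum(sentence_body)}\r\n"
-- ===== SOURCE B (Python) =====
-- def nmea_checksum(sentence: str) -> str:
--     checksum = 0
--     for ch in sentence:
--         checksum ^= ord(ch)
--     return f"{checksum:02X}"
--
-- def build_vsd(mmsi: int, vessel_name: str) -> str:
--     name = vessel_name[:20].upper().ljust(20, "@")
--
--     # Accumulate the whole 168-bit frame in one integer instead of a bit list.
--     acc = 0
--     nbits = 0
--
--     def put(value: int, width: int) -> None:
--         nonlocal acc, nbits
--         acc = (acc << width) + (value & ((1 << width) - 1))
--         nbits += width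
--
--     put(24, 6)
--     put(0, 2)
--     put(mmsi, 30)
--     put(0, 2)
--     for ch in name:
--         code = ord(ch)
--         if code >= 64:
--             code -= 64
--         put(code, 6)
--     put(0, 8)
--
--     # Emit 6-bit groups from the most significant end.
--     chars = []
--     for k in range(nbits // 6 - 1, -1, -1):
--         value = (acc >> (6 * k)) & 0x3F
--         char_code = value + 48
--         if char_code > 87:
--             char_code += 8
--         chars.append(chr(char_code))
--     payload = "".join(chars)
--
--     sentence_body = f"AIVDM,1,1,,A,{payload},0"
--     return f"!{sentence_body}*{nmea_checksum(sentence_body)}\r\n"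
-- ===== Notes on version B (the rewrite author's own statement) =====
-- stated objective: alternative
-- what changed: B accumulates the whole 168-bit frame in a single integer with shift-add per field (masking each value to its width) and then extracts the 28 six-bit payload groups from the most significant end, instead of A's flat Python list of individual bits that is later re-grouped six at a time.
import Mathlib
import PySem

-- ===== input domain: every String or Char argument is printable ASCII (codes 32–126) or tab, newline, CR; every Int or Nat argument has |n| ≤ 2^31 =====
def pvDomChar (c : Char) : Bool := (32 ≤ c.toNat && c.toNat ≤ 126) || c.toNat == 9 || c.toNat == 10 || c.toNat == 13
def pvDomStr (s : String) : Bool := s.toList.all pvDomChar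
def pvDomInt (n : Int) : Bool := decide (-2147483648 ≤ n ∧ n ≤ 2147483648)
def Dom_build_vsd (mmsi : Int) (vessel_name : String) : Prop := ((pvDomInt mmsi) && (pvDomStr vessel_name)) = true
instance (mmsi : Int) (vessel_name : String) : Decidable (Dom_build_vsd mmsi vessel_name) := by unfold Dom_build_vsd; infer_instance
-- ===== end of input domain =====

-- B replaces A's flat list of single bits by one integer accumulator (shift-add per field,
-- then extract 6-bit groups from the most significant end); objective: alternative data structure.

-- ===== PORT A =====
-- f"{checksum:02X}" ported by hand: uppercase hex digits, left-padded with '0' to width 2;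
-- exact for checksum ≥ 0 (an xor of character codes, as in both programs).
def pvHexDig (n : Nat) : Char := Char.ofNat (if n < 10 then 48 + n else 55 + n)

def pvHexChars (n : Nat) : List Char :=
  if _h : n < 16 then [pvHexDig n] else pvHexChars (n / 16) ++ [pvHexDig (n % 16)]
decreasing_by exact Nat.div_lt_self (by omega) (by omega)

def nmea_checksum (sentence : String) : String :=
  let checksum := sentence.toList.foldl (fun c ch => PySem.Int.bxor c ((ch.toNat : Int))) 0
  let ds := pvHexChars checksum.toNat
  String.mk (List.replicate (2 - ds.length) '0' ++ ds)

-- `while len(bits) % 6: bits.append(0)` as the equivalent structural recursion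
def pvPadBits (bits : List Int) : List Int :=
  if bits.length % 6 = 0 then bits else pvPadBits (bits ++ [0])
termination_by (6 - bits.length % 6) % 6
decreasing_by simp [List.length_append]; omega

def encode_payload (bits : List Int) : String :=
  let bits := pvPadBits bits
  let payload := (PySem.List.pyRange 0 (bits.length : Int) 6).foldl (fun payload i =>
      let value := (PySem.List.slice bits (some i) (some (i + 6))).foldl
          (fun v b => PySem.Int.bor (v <<< (1 : Int)) b) 0
      let char_code := value + 48
      let char_code := if char_code > 87 then char_code + 8 else char_code
      payload ++ [Char.ofNat char_code.toNat]) ([] : List Char)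
  String.mk payload

def pvPush (bits : List Int) (value : Int) (width : Int) : List Int :=
  (PySem.List.pyRange (width - 1) (-1) (-1)).foldl
    (fun bits i => bits ++ [PySem.Int.band (value >>> i) 1]) bits

def pvPushStr (bits : List Int) (value : List Char) (width : Int) : List Int :=
  (PySem.List.slice value none (some width)).foldl (fun bits ch =>
    let code : Int := (ch.toNat : Int)
    let code := if code ≥ 64 then code - 64 else code
    pvPush bits code 6) bits

-- name = vessel_name[:20].upper().ljust(20, "@"); ljust ported by hand (pad on the right
-- with '@' to length 20; exact: ljust never truncates and the input is at most 20 chars here)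
def pvName (vessel_name : String) : List Char :=
  let name := PySem.Chars.upper (PySem.List.slice vessel_name.toList none (some 20))
  name ++ List.replicate (20 - name.length) '@'

def build_vsd (mmsi : Int) (vessel_name : String) : String :=
  let name := pvName vessel_name
  let bits := pvPush [] 24 6
  let bits := pvPush bits 0 2
  let bits := pvPush bits mmsi 30
  let bits := pvPush bits 0 2
  let bits := pvPushStr bits name 20
  let bits := pvPush bits 0 8
  let payload := encode_payload bits
  let sentence_body := "AIVDM,1,1,,A," ++ payload ++ ",0"
  "!" ++ sentence_body ++ "*" ++ nmea_checksum sentence_body ++ "\r\n"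

-- ===== PORT B =====
-- put(value, width): acc = (acc << width) + (value & ((1 << width) - 1)); nbits += width
def pvPut (st : Int × Int) (value : Int) (width : Int) : Int × Int :=
  ((st.1 <<< width) + PySem.Int.band value ((1 <<< width) - 1), st.2 + width)

def build_vsd_alt (mmsi : Int) (vessel_name : String) : String :=
  let name := pvName vessel_name
  let st : Int × Int := (0, 0)
  let st := pvPut st 24 6
  let st := pvPut st 0 2
  let st := pvPut st mmsi 30
  let st := pvPut st 0 2
  let st := name.foldl (fun st ch =>
      let code : Int := (ch.toNat : Int)
      let code := if code ≥ 64 then code - 64 else code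
      pvPut st code 6) st
  let st := pvPut st 0 8
  let acc := st.1
  let nbits := st.2
  let chars := (PySem.List.pyRange (PySem.Int.floordiv nbits 6 - 1) (-1) (-1)).foldl
      (fun chars k =>
        let value := PySem.Int.band (acc >>> (6 * k)) 63
        let char_code := value + 48
        let char_code := if char_code > 87 then char_code + 8 else char_code
        chars ++ [Char.ofNat char_code.toNat]) ([] : List Char)
  let payload := String.mk chars
  let sentence_body := "AIVDM,1,1,,A," ++ payload ++ ",0"
  "!" ++ sentence_body ++ "*" ++ nmea_checksum sentence_body ++ "\r\n"

-- ===== PRECONDITION & SPEC =====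
def Spec_build_vsd (mmsi : Int) (vessel_name : String) (out : String) : Prop := out = build_vsd_alt mmsi vessel_name
instance (mmsi : Int) (vessel_name : String) (out : String) : Decidable (Spec_build_vsd mmsi vessel_name out) := by unfold Spec_build_vsd; infer_instance

-- ===== CLAIM (what is proved, stated in full; the proofs are below) =====
def Claim_equal_build_vsd : Prop := ∀ (mmsi : Int) (vessel_name : String), Dom_build_vsd mmsi vessel_name → Spec_build_vsd mmsi vessel_name (build_vsd mmsi vessel_name)

-- ===== LEMMAS AND PROOFS =====

theorem pv_shiftR_nat (v : Int) (n : Nat) : v >>> (n : Int) = v / 2 ^ n := by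
  cases v with
  | ofNat m =>
      show ((m : Int)) >>> (n : Int) = _
      rw [Int.shiftRight_natCast]
      rw [Nat.shiftRight_eq_div_pow]
      push_cast [Int.natCast_ediv]
      rfl
  | negSucc m =>
      rw [Int.shiftRight_negSucc]
      have h0 : Int.negSucc m >>> n = Int.negSucc (m >>> n) := rfl
      rw [← h0, Int.shiftRight_eq_div_pow]
      push_cast; ring_nf

theorem pv_shiftL_nat (v : Int) (n : Nat) : v <<< (n : Int) = v * 2 ^ n := by
  rw [Int.shiftLeft_eq_mul_pow]; norm_cast

theorem pv_band_mask (v : Int) (w : Nat) : PySem.Int.band v (2 ^ w - 1) = v % 2 ^ w := by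
  have hcp : ((2:Int) ^ w) = ((2 ^ w : Nat) : Int) := by push_cast; ring
  have hM : 0 < 2 ^ w := Nat.two_pow_pos w
  have h2 : (0:Int) < 2 ^ w := by positivity
  have h2n : ((2:Int) ^ w - 1).toNat = 2 ^ w - 1 := by rw [hcp] at *; omega
  by_cases hv : 0 ≤ v
  · rw [PySem.Int.band, if_pos hv, if_pos (by omega : (0:Int) ≤ 2 ^ w - 1)]
    rw [h2n, Nat.and_two_pow_sub_one_eq_mod]
    rw [show ((v.toNat % 2 ^ w : Nat) : Int) = (v.toNat : Int) % ((2 ^ w : Nat) : Int) by push_cast; ring]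
    rw [Int.toNat_of_nonneg hv, ← hcp]
  · rw [PySem.Int.band, if_neg hv, if_pos (by omega : (0:Int) ≤ 2 ^ w - 1)]
    set n := (-v - 1).toNat with hn
    have hvn : v = -(n : Int) - 1 := by omega
    have hml : n % 2 ^ w < 2 ^ w := Nat.mod_lt _ hM
    rw [h2n, Nat.and_comm, Nat.and_two_pow_sub_one_eq_mod]
    have hcast : (((2 ^ w - 1 - n % 2 ^ w : Nat)) : Int) = 2 ^ w - 1 - ((n % 2 ^ w : Nat) : Int) := by
      rw [hcp]
      generalize 2 ^ w = M at hml hM ⊢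
      omega
    rw [hcast]
    have hmc : ((n % 2 ^ w : Nat) : Int) = (n : Int) % 2 ^ w := by push_cast; ring
    rw [hmc, hvn]
    have hb0 : (0:Int) ≤ (n:Int) % 2 ^ w := Int.emod_nonneg _ (by omega)
    have hb1 : (n:Int) % 2 ^ w < 2 ^ w := Int.emod_lt_of_pos _ h2
    have hdecomp : (-(n:Int) - 1) =
        (2 ^ w - 1 - (n:Int) % 2 ^ w) + (-((n:Int) / 2 ^ w) - 1) * 2 ^ w := by
      have h := Int.mul_ediv_add_emod (n:Int) (2 ^ w)
      ring_nf; ring_nf at h; linarith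
    rw [hdecomp, Int.add_mul_emod_self_right]
    exact (Int.emod_eq_of_lt (by linarith) (by linarith)).symm
theorem pv_nat_two_mul_or_one (m : Nat) : 2 * m ||| 1 = 2 * m + 1 := by
  have h := Nat.lor_bit false m true 0
  simp [Nat.bit] at h
  omega

theorem pv_bor_bit (v b : Int) (hv : 0 ≤ v) (hb : b = 0 ∨ b = 1) :
    PySem.Int.bor (v <<< (1 : Int)) b = 2 * v + b := by
  have hs : v <<< (1:Int) = v * 2 ^ 1 := by
    have h := Int.shiftLeft_eq_mul_pow v 1
    norm_num at h ⊢; linarith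
  rcases hb with rfl | rfl
  · simp [hs]; ring
  · rw [hs, PySem.Int.bor, if_pos (by positivity), if_pos (by omega : (0:Int) ≤ 1)]
    have h1 : (v * 2 ^ 1).toNat = 2 * v.toNat := by omega
    have h2 : ((1:Int)).toNat = 1 := rfl
    rw [h1, h2, pv_nat_two_mul_or_one]
    omega

def pvBitsOf (v : Int) (w : Nat) : List Int :=
  List.map (fun k => v / 2 ^ k % 2) (List.range w).reverse

def pvVal (a : Int) (l : List Int) : Int := l.foldl (fun a b => 2 * a + b) a

def pvGoodBits (l : List Int) : Prop := ∀ b ∈ l, b = 0 ∨ b = 1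

theorem pv_foldl_append_map {α β : Type} (l : List α) (f : α → β) (acc : List β) :
    l.foldl (fun p x => p ++ [f x]) acc = acc ++ l.map f := by
  induction l generalizing acc with
  | nil => simp
  | cons x xs ih => simp [List.foldl_cons, ih]

theorem pv_pyRange_countdown (w : Nat) :
    PySem.List.pyRange ((w : Int) - 1) (-1) (-1) = List.map (fun k : Nat => (k : Int)) (List.range w).reverse := by
  rcases Nat.eq_zero_or_pos w with rfl | hw
  · rw [PySem.List.pyRange]; norm_num
  · rw [PySem.List.pyRange]
    rw [if_neg (by norm_num : ¬ (-1:Int) = 0)]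
    rw [if_neg (by norm_num : ¬ (0:Int) < -1)]
    rw [if_pos (by omega : (-1:Int) < (w:Int) - 1)]
    show List.map _ (List.range (((w:Int) - 1 - (-1) + -(-1) - 1) / -(-1)).toNat) = _
    have hc : (((w:Int) - 1 - (-1) + -(-1) - 1) / -(-1)).toNat = w := by norm_num
    rw [hc]
    apply List.ext_getElem
    · simp
    · intro j h1 h2
      simp only [List.getElem_map, List.getElem_reverse, List.getElem_range]
      simp only [List.length_map, List.length_range] at h1 h2
      norm_num at h1 h2 ⊢
      omega

theorem pvPush_eq (bits : List Int) (v : Int) (w : Nat) :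
    pvPush bits v ((w : Int)) = bits ++ pvBitsOf v w := by
  rw [pvPush, pvBitsOf, pv_pyRange_countdown, pv_foldl_append_map, List.map_map]
  congr 1
  apply List.map_congr_left
  intro k hk
  simp only [Function.comp]
  rw [pv_shiftR_nat]
  have h := pv_band_mask (v / 2 ^ k) 1
  norm_num at h
  exact h

theorem pvVal_append (a : Int) (xs ys : List Int) :
    pvVal a (xs ++ ys) = pvVal (pvVal a xs) ys := by
  simp [pvVal, List.foldl_append]

theorem pvVal_shift (a : Int) (l : List Int) :
    pvVal a l = a * 2 ^ l.length + pvVal 0 l := by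
  induction l generalizing a with
  | nil => simp [pvVal]
  | cons b t ih =>
      rw [pvVal, List.foldl_cons, ← pvVal, ih]
      have h2 : pvVal 0 (b :: t) = (2 * 0 + b) * 2 ^ t.length + pvVal 0 t := by
        rw [pvVal, List.foldl_cons, ← pvVal, ih]
      rw [List.length_cons, h2]
      ring

theorem pvVal_nonneg (l : List Int) (h : pvGoodBits l) : 0 ≤ pvVal 0 l := by
  induction l with
  | nil => simp [pvVal]
  | cons b t ih =>
      have hb := h b (by simp)
      have ht : pvGoodBits t := fun x hx => h x (by simp [hx])
      rw [pvVal, List.foldl_cons, ← pvVal, pvVal_shift]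
      have h1 : (0:Int) ≤ 2 * 0 + b := by rcases hb with rfl | rfl <;> norm_num
      have h2 := ih ht
      positivity

theorem pvVal_lt (l : List Int) (h : pvGoodBits l) : pvVal 0 l < 2 ^ l.length := by
  induction l with
  | nil => simp [pvVal]
  | cons b t ih =>
      have hb := h b (by simp)
      have ht : pvGoodBits t := fun x hx => h x (by simp [hx])
      have h2 : pvVal 0 (b :: t) = (2 * 0 + b) * 2 ^ t.length + pvVal 0 t := by
        rw [pvVal, List.foldl_cons, ← pvVal, pvVal_shift]
      rw [h2, List.length_cons]
      have h3 := ih ht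
      have h4 : (0:Int) < 2 ^ t.length := by positivity
      rcases hb with rfl | rfl <;> [skip; skip] <;> ring_nf <;> nlinarith

-- v % 2^(w+1) decomposes as top bit + low part
theorem pv_emod_pow_succ (v : Int) (w : Nat) :
    v % 2 ^ (w + 1) = (v / 2 ^ w % 2) * 2 ^ w + v % 2 ^ w := by
  have h2 : (0:Int) < 2 ^ w := by positivity
  set q := v / 2 ^ w with hq
  set r := v % 2 ^ w with hr
  have hv : v = 2 ^ w * q + r := (Int.mul_ediv_add_emod v (2 ^ w)).symm
  have hr0 : 0 ≤ r := Int.emod_nonneg _ (by omega)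
  have hr1 : r < 2 ^ w := Int.emod_lt_of_pos _ h2
  have hq2 : q = 2 * (q / 2) + q % 2 := by omega
  have hb0 : 0 ≤ q % 2 := Int.emod_nonneg _ (by omega)
  have hb1 : q % 2 < 2 := Int.emod_lt_of_pos _ (by omega)
  have hd : v = (q % 2 * 2 ^ w + r) + (q / 2) * 2 ^ (w + 1) := by
    rw [pow_succ]; nlinarith [hv, hq2]
  rw [hd, Int.add_mul_emod_self_right]
  exact Int.emod_eq_of_lt (by positivity) (by rw [pow_succ]; nlinarith)

theorem pvVal_bitsOf (a v : Int) (w : Nat) :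
    pvVal a (pvBitsOf v w) = a * 2 ^ w + v % 2 ^ w := by
  induction w generalizing a with
  | zero => simp [pvVal, pvBitsOf]
  | succ w ih =>
      have hsplit : pvBitsOf v (w + 1) = (v / 2 ^ w % 2) :: pvBitsOf v w := by
        rw [pvBitsOf, pvBitsOf, List.range_succ, List.reverse_append]
        simp
      rw [hsplit, pvVal, List.foldl_cons, ← pvVal, ih, pv_emod_pow_succ]
      ring

theorem pvGood_bitsOf (v : Int) (w : Nat) : pvGoodBits (pvBitsOf v w) := by
  intro b hb
  rw [pvBitsOf] at hb
  simp only [List.mem_map] at hb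
  obtain ⟨k, _, rfl⟩ := hb
  omega

def pvCode (ch : Char) : Int :=
  if (ch.toNat : Int) ≥ 64 then (ch.toNat : Int) - 64 else (ch.toNat : Int)

theorem pv_foldl_append_flat {α : Type} (l : List α) (h : α → List Int) (acc : List Int) :
    l.foldl (fun bs x => bs ++ h x) acc = acc ++ l.flatMap h := by
  induction l generalizing acc with
  | nil => simp
  | cons x xs ih => simp [List.foldl_cons, ih]

theorem pvPushStr_eq (bits : List Int) (value : List Char) :
    pvPushStr bits value 20 = bits ++ (value.take 20).flatMap (fun ch => pvBitsOf (pvCode ch) 6) := by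
  rw [pvPushStr, PySem.List.slice_to value (by norm_num : (0:Int) ≤ 20)]
  have h20 : ((20:Int)).toNat = 20 := rfl
  rw [h20]
  have hbody : ∀ (bs : List Int) (ch : Char),
      (fun bits ch =>
        let code : Int := (ch.toNat : Int)
        let code := if code ≥ 64 then code - 64 else code
        pvPush bits code 6) bs ch = bs ++ pvBitsOf (pvCode ch) 6 := by
    intro bs ch
    show pvPush bs (pvCode ch) 6 = bs ++ pvBitsOf (pvCode ch) 6
    rw [show (6:Int) = ((6:Nat):Int) by norm_num, pvPush_eq]
  have hfun : (fun (bits : List Int) (ch : Char) =>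
      let code : Int := (ch.toNat : Int)
      let code := if code ≥ 64 then code - 64 else code
      pvPush bits code 6) = fun bs ch => bs ++ pvBitsOf (pvCode ch) 6 := by
    funext bs ch
    exact hbody bs ch
  rw [hfun, pv_foldl_append_flat]

theorem pv_chunk (bits : List Int) (h : pvGoodBits bits) (n j : Nat)
    (hlen : bits.length = 6 * n) (hj : j < n) :
    pvVal 0 ((bits.drop (6 * j)).take 6) = pvVal 0 bits / 2 ^ (6 * (n - 1 - j)) % 64 := by
  set pre := bits.take (6 * j) with hpre
  set g := (bits.drop (6 * j)).take 6 with hg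
  set suf := (bits.drop (6 * j)).drop 6 with hsuf
  have hsplit : bits = pre ++ (g ++ suf) := by
    rw [hpre, hg, hsuf, List.take_append_drop, List.take_append_drop]
  have hglen : g.length = 6 := by
    rw [hg]; simp [List.length_take, List.length_drop, hlen]; omega
  have hslen : suf.length = 6 * (n - 1 - j) := by
    rw [hsuf]; simp [List.length_drop, hlen]; omega
  have hgood_g : pvGoodBits g := fun x hx =>
    h x (List.mem_of_mem_drop (List.mem_of_mem_take hx))
  have hgood_s : pvGoodBits suf := fun x hx => h x (List.mem_of_mem_drop (List.mem_of_mem_drop hx))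
  have hacc : pvVal 0 bits =
      (pvVal 0 pre * 2 ^ 6 + pvVal 0 g) * 2 ^ (6 * (n - 1 - j)) + pvVal 0 suf := by
    conv_lhs => rw [hsplit]
    rw [pvVal_append, pvVal_append]
    rw [pvVal_shift (pvVal (pvVal 0 pre) g) suf, hslen]
    rw [pvVal_shift (pvVal 0 pre) g, hglen]
  have hs0 : (0:Int) ≤ pvVal 0 suf := pvVal_nonneg _ hgood_s
  have hs1 : pvVal 0 suf < 2 ^ (6 * (n - 1 - j)) := by
    have := pvVal_lt suf hgood_s; rwa [hslen] at this
  have hg0 : (0:Int) ≤ pvVal 0 g := pvVal_nonneg _ hgood_g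
  have hg1 : pvVal 0 g < 2 ^ 6 := by
    have := pvVal_lt g hgood_g; rwa [hglen] at this
  rw [hacc]
  rw [add_comm, Int.add_mul_ediv_right _ _ (by positivity : ((2:Int) ^ (6 * (n - 1 - j))) ≠ 0)]
  rw [Int.ediv_eq_zero_of_lt hs0 hs1, zero_add]
  symm
  rw [show ((2:Int) ^ 6) = 64 by norm_num] at hg1 ⊢
  rw [add_comm, Int.add_mul_emod_self_right]
  exact Int.emod_eq_of_lt hg0 hg1

theorem pv_range6 (n : Nat) :
    PySem.List.pyRange 0 ((6 * n : Nat) : Int) 6 = List.map (fun j : Nat => ((6 * j : Nat) : Int)) (List.range n) := by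
  rw [PySem.List.pyRange]
  rw [if_neg (by norm_num : ¬ (6:Int) = 0)]
  rcases Nat.eq_zero_or_pos n with rfl | hn
  · norm_num
  · rw [if_pos (by norm_num : (0:Int) < 6), if_pos (by push_cast; omega : (0:Int) < ((6 * n : Nat) : Int))]
    show List.map _ (List.range ((((6 * n : Nat) : Int) - 0 + 6 - 1) / 6).toNat) = _
    have hc : ((((6 * n : Nat) : Int) - 0 + 6 - 1) / 6).toNat = n := by
      push_cast; omega
    rw [hc]
    apply List.ext_getElem
    · simp
    · intro j h1 h2
      simp only [List.getElem_map, List.getElem_range]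
      push_cast; ring

theorem pv_bor_fold (g : List Int) (a : Int) (ha : 0 ≤ a) (h : pvGoodBits g) :
    g.foldl (fun v b => PySem.Int.bor (v <<< (1 : Int)) b) a = pvVal a g := by
  induction g generalizing a with
  | nil => simp [pvVal]
  | cons b t ih =>
      have hb := h b (by simp)
      have ht : pvGoodBits t := fun x hx => h x (by simp [hx])
      rw [List.foldl_cons, pv_bor_bit a b ha hb, pvVal, List.foldl_cons, ← pvVal]
      exact ih (2 * a + b) (by rcases hb with rfl | rfl <;> omega) ht

def pvCharOf (value : Int) : Char :=
  Char.ofNat (if value + 48 > 87 then value + 48 + 8 else value + 48).toNat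

theorem pv_encode_eq (bits : List Int) (h : pvGoodBits bits) (n : Nat) (hlen : bits.length = 6 * n) :
    encode_payload bits = String.mk ((List.range n).map (fun j =>
      pvCharOf (pvVal 0 bits / 2 ^ (6 * (n - 1 - j)) % 64))) := by
  rw [encode_payload]
  have hpad : pvPadBits bits = bits := by rw [pvPadBits, if_pos (by omega)]
  rw [hpad, hlen, pv_range6, List.foldl_map, pv_foldl_append_map]
  congr 1
  apply List.map_congr_left
  intro j hj
  have hj' : j < n := List.mem_range.mp hj
  have hslice : PySem.List.slice bits (some ((6 * j : Nat) : Int)) (some (((6 * j : Nat) : Int) + 6)) =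
      (bits.drop (6 * j)).take 6 := by
    have := PySem.List.slice_natCast_add bits (6 * j) 6
    push_cast at this ⊢
    convert this using 3
  show pvCharOf ((PySem.List.slice bits (some ((6 * j : Nat) : Int)) (some (((6 * j : Nat) : Int) + 6))).foldl
      (fun v b => PySem.Int.bor (v <<< (1 : Int)) b) 0) = _
  rw [hslice, pv_bor_fold _ 0 le_rfl (fun x hx => h x (List.mem_of_mem_drop (List.mem_of_mem_take hx)))]
  rw [pv_chunk bits h n j hlen hj']

theorem pvVal_flat_codes (a : Int) (l : List Char) :
    pvVal a (l.flatMap (fun ch => pvBitsOf (pvCode ch) 6)) =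
      l.foldl (fun a ch => a * 64 + pvCode ch % 64) a := by
  induction l generalizing a with
  | nil => simp [pvVal]
  | cons c t ih =>
      rw [List.flatMap_cons, pvVal_append, pvVal_bitsOf, List.foldl_cons, ih]
      norm_num

theorem pvPut_eq (st : Int × Int) (v : Int) (w : Nat) :
    pvPut st v ((w : Nat) : Int) = (st.1 * 2 ^ w + v % 2 ^ w, st.2 + w) := by
  rw [pvPut, pv_shiftL_nat]
  have hm : (1 : Int) <<< ((w : Nat) : Int) - 1 = 2 ^ w - 1 := by
    rw [pv_shiftL_nat]; ring
  rw [hm, pv_band_mask]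

theorem pvName_len (s : String) : (pvName s).length = 20 := by
  rw [pvName]
  simp only [PySem.Chars.upper, PySem.List.slice_to s.toList (by norm_num : (0:Int) ≤ 20)]
  simp [List.length_append, List.length_map, List.length_take]

theorem pvPutStr_fold (l : List Char) (st : Int × Int) :
    l.foldl (fun st ch =>
      let code : Int := (ch.toNat : Int)
      let code := if code ≥ 64 then code - 64 else code
      pvPut st code 6) st =
    (l.foldl (fun a ch => a * 64 + pvCode ch % 64) st.1, st.2 + 6 * l.length) := by
  induction l generalizing st with
  | nil => simp
  | cons c t ih =>
      rw [List.foldl_cons, List.foldl_cons]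
      have hstep : (let code : Int := (c.toNat : Int)
          let code := if code ≥ 64 then code - 64 else code
          pvPut st code 6) = (st.1 * 64 + pvCode c % 64, st.2 + 6) := by
        show pvPut st (pvCode c) 6 = _
        rw [show (6:Int) = ((6:Nat):Int) by norm_num, pvPut_eq]
        norm_num
      rw [hstep, ih]
      simp [List.length_cons]
      ring

theorem pvBitsOf_len (v : Int) (w : Nat) : (pvBitsOf v w).length = w := by
  simp [pvBitsOf]

theorem pvGood_append (xs ys : List Int) (hx : pvGoodBits xs) (hy : pvGoodBits ys) :
    pvGoodBits (xs ++ ys) := by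
  intro b hb
  rcases List.mem_append.mp hb with h | h
  · exact hx b h
  · exact hy b h

theorem pvGood_flat (l : List Char) :
    pvGoodBits (l.flatMap (fun ch => pvBitsOf (pvCode ch) 6)) := by
  intro b hb
  rcases List.mem_flatMap.mp hb with ⟨c, _, hc⟩
  exact pvGood_bitsOf _ _ b hc

theorem pvPush_eq6 (bits : List Int) (v : Int) : pvPush bits v 6 = bits ++ pvBitsOf v 6 := by
  have h := pvPush_eq bits v 6; norm_num at h; exact h
theorem pvPush_eq2 (bits : List Int) (v : Int) : pvPush bits v 2 = bits ++ pvBitsOf v 2 := by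
  have h := pvPush_eq bits v 2; norm_num at h; exact h
theorem pvPush_eq30 (bits : List Int) (v : Int) : pvPush bits v 30 = bits ++ pvBitsOf v 30 := by
  have h := pvPush_eq bits v 30; norm_num at h; exact h
theorem pvPush_eq8 (bits : List Int) (v : Int) : pvPush bits v 8 = bits ++ pvBitsOf v 8 := by
  have h := pvPush_eq bits v 8; norm_num at h; exact h

theorem pvPut_eq6 (st : Int × Int) (v : Int) : pvPut st v 6 = (st.1 * 64 + v % 64, st.2 + 6) := by
  have h := pvPut_eq st v 6; norm_num at h; exact h
theorem pvPut_eq2 (st : Int × Int) (v : Int) : pvPut st v 2 = (st.1 * 4 + v % 4, st.2 + 2) := by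
  have h := pvPut_eq st v 2; norm_num at h; exact h
theorem pvPut_eq30 (st : Int × Int) (v : Int) :
    pvPut st v 30 = (st.1 * 2 ^ 30 + v % 2 ^ 30, st.2 + 30) := by
  have h := pvPut_eq st v 30; norm_num at h; exact h
theorem pvPut_eq8 (st : Int × Int) (v : Int) : pvPut st v 8 = (st.1 * 256 + v % 256, st.2 + 8) := by
  have h := pvPut_eq st v 8; norm_num at h; exact h

theorem pvPutStr_fold' (l : List Char) (st : Int × Int) :
    l.foldl (fun st ch =>
      pvPut st (if (ch.toNat : Int) ≥ 64 then (ch.toNat : Int) - 64 else (ch.toNat : Int)) 6) st =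
    (l.foldl (fun a ch => a * 64 + pvCode ch % 64) st.1, st.2 + 6 * l.length) :=
  pvPutStr_fold l st

theorem pv_bchars (acc nbits : Int) (h : nbits = 168) :
    (PySem.List.pyRange (PySem.Int.floordiv nbits 6 - 1) (-1) (-1)).foldl
      (fun chars k =>
        chars ++ [Char.ofNat (if PySem.Int.band (acc >>> (6 * k)) 63 + 48 > 87
            then PySem.Int.band (acc >>> (6 * k)) 63 + 48 + 8
            else PySem.Int.band (acc >>> (6 * k)) 63 + 48).toNat]) ([] : List Char) =
    (List.range 28).map (fun j => pvCharOf (acc / 2 ^ (6 * (27 - j)) % 64)) := by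
  subst h
  rw [show PySem.Int.floordiv 168 6 - 1 = (28 : Int) - 1 by decide]
  rw [show ((28:Int)) = ((28 : Nat) : Int) by norm_num, pv_pyRange_countdown]
  rw [pv_foldl_append_map, List.map_map, List.nil_append]
  apply List.ext_getElem
  · simp
  · intro j h1 h2
    simp only [List.length_map, List.length_reverse, List.length_range] at h1 h2
    simp only [List.getElem_map, List.getElem_reverse, List.length_range, List.getElem_range, Function.comp]
    have hk : 28 - 1 - j = 27 - j := by omega
    rw [hk]
    have hsh : (6 : Int) * ((27 - j : Nat) : Int) = ((6 * (27 - j) : Nat) : Int) := by push_cast; ring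
    rw [hsh, pv_shiftR_nat]
    rw [show (63 : Int) = 2 ^ 6 - 1 by norm_num, pv_band_mask]
    rw [pvCharOf]
    norm_num

def pvAcc (mmsi : Int) (name : List Char) : Int :=
  name.foldl (fun a ch => a * 64 + pvCode ch % 64)
    ((((24 % 64) * 4 + 0 % 4) * 2 ^ 30 + mmsi % 2 ^ 30) * 4 + 0 % 4) * 256 + 0 % 256

theorem pv_apayload (mmsi : Int) (name : List Char) (hnl : name.length = 20) :
    encode_payload (pvPush (pvPushStr (pvPush (pvPush (pvPush (pvPush [] 24 6) 0 2) mmsi 30) 0 2) name 20) 0 8) =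
    String.mk ((List.range 28).map (fun j =>
      pvCharOf (pvAcc mmsi name / 2 ^ (6 * (27 - j)) % 64))) := by
  have htake : name.take 20 = name := List.take_of_length_le (le_of_eq hnl)
  rw [pvPush_eq6, pvPush_eq2, pvPush_eq30, pvPush_eq2, pvPushStr_eq, htake, pvPush_eq8,
    List.nil_append]
  set L : List Int := ((((pvBitsOf 24 6 ++ pvBitsOf 0 2) ++ pvBitsOf mmsi 30) ++ pvBitsOf 0 2)
      ++ name.flatMap (fun ch => pvBitsOf (pvCode ch) 6)) ++ pvBitsOf 0 8 with hL
  have hgood : pvGoodBits L := by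
    rw [hL]
    apply pvGood_append
    apply pvGood_append
    apply pvGood_append
    apply pvGood_append
    apply pvGood_append
    · exact pvGood_bitsOf _ _
    · exact pvGood_bitsOf _ _
    · exact pvGood_bitsOf _ _
    · exact pvGood_bitsOf _ _
    · exact pvGood_flat _
    · exact pvGood_bitsOf _ _
  have hlen : L.length = 6 * 28 := by
    rw [hL]
    simp [pvBitsOf_len, hnl]
  rw [pv_encode_eq L hgood 28 hlen]
  have hacc : pvVal 0 L = pvAcc mmsi name := by
    rw [hL, pvVal_append, pvVal_append, pvVal_append, pvVal_append, pvVal_append]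
    rw [pvVal_bitsOf, pvVal_bitsOf, pvVal_bitsOf, pvVal_bitsOf, pvVal_flat_codes, pvVal_bitsOf]
    rw [pvAcc]
    norm_num
  rw [hacc]

theorem pv_main (mmsi : Int) (s : String) : build_vsd mmsi s = build_vsd_alt mmsi s := by
  simp only [build_vsd, build_vsd_alt]
  rw [pvPut_eq6, pvPut_eq2, pvPut_eq30, pvPut_eq2, pvPutStr_fold', pvPut_eq8]
  rw [pv_apayload mmsi (pvName s) (pvName_len s)]
  rw [pv_bchars _ _ (by simp [pvName_len])]
  norm_num [pvAcc]

-- ===== VERDICT (by name: the statement is the Claim_ definition above) =====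
theorem build_vsd_spec : Claim_equal_build_vsd := by
  unfold Claim_equal_build_vsd
  intro mmsi s _
  unfold Spec_build_vsd
  exact pv_main mmsi s
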